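-- pv_equiv track=rewrite | github.com/jcarrots/taco | symbolic/ordered_cumulants.py | pairing_overlap_graph_connected
-- ===== SOURCE A (Python) =====
-- def normalize_pairs(pairs):
--     """Normalize and sort arc endpoints (i<j) and by left endpoint."""
--     return sorted([(min(i,j), max(i,j)) for (i,j) in pairs], key=lambda p: (p[0], p[1]))
--
-- def pair_relation(p1, p2):
--     """Classify two arcs p1=(i,j), p2=(k,l) with i<j, k<l."""
--     (i,j) = p1; (k,l) = p2
--     if j < k or l < i:
--         return 'parallel'
--     if (i < k and l < j) or (k < i and j < l):
--         return 'nested'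
--     return 'crossed'
--
-- def pairing_overlap_graph_connected(pairs) -> bool:
--     """
--     Build graph whose vertices are arcs; edge if two arcs are NOT parallel.
--     Return True iff the graph is connected (linked), i.e., survives the ordered cumulant.
--     """
--     arcs = normalize_pairs(pairs)
--     n = len(arcs)
--     if n == 0: return True
--     adj = {i:set() for i in range(n)}
--     for i in range(n):
--         for j in range(i+1, n):
--             if pair_relation(arcs[i], arcs[j]) != 'parallel':
--                 adj[i].add(j); adj[j].add(i)
--     # BFS
--     seen = {0}; stack = [0]
--     while stack:
--         u = stack.pop()
--         for v in adj[u]: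
--             if v not in seen:
--                 seen.add(v); stack.append(v)
--     return len(seen) == n
-- ===== SOURCE B (Python) =====
-- def pairing_overlap_graph_connected(pairs) -> bool:
--     """Sort arcs by endpoints, then sweep left to right tracking the max right
--     endpoint; the overlap graph is connected iff no arc starts past that max."""
--     ivs = sorted((min(i, j), max(i, j)) for (i, j) in pairs)
--     if not ivs:
--         return True
--     maxr = ivs[0][1]
--     for (l, r) in ivs[1:]:
--         if l > maxr:
--             return False
--         if r > maxr:
--             maxr = r
--     return True
-- ===== Notes on version B (the rewrite author's own statement) =====
-- stated objective: faster
-- what changed: Replaces the O(n^2) pairwise arc-relation graph plus BFS with a sort-and-sweep over left endpoints tracking the running max right endpoint: a gap (next left > running max) is exactly a disconnection of the overlap graph.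
import Mathlib
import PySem

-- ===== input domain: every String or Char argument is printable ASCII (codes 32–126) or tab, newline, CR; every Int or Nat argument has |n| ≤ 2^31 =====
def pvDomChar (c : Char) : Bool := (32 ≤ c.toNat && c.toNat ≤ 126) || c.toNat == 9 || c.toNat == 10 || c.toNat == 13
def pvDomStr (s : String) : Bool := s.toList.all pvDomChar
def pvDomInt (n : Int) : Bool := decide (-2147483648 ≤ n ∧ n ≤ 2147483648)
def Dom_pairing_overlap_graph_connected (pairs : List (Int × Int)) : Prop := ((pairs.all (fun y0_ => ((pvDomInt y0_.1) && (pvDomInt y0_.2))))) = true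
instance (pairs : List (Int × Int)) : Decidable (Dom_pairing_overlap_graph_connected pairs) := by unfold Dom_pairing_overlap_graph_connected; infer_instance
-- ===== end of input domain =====

-- B replaces A's O(n^2) arc-relation graph + BFS by a sort-and-sweep over left endpoints (objective: faster).

-- ===== PORT A =====
def normalize_pairs (pairs : List (Int × Int)) : List (Int × Int) :=
  PySem.List.sorted2 (pairs.map (fun p => (min p.1 p.2, max p.1 p.2))) (fun p => p.1) (fun p => p.2)

def pair_relation (p1 p2 : Int × Int) : String :=
  if p1.2 < p2.1 ∨ p2.2 < p1.1 then "parallel"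
  else if (p1.1 < p2.1 ∧ p2.2 < p1.2) ∨ (p2.1 < p1.1 ∧ p1.2 < p2.2) then "nested"
  else "crossed"

-- arcs[i]: every index used below comes from range(n), so it is in range and the default is never used (exact)
def pvArcAt (arcs : List (Int × Int)) (i : Int) : Int × Int :=
  PySem.List.pyGetD arcs i (0, 0)

-- adj[i].add(j); adj[j].add(i) — both keys are present (initialised over range(n)), so the `modify` default is never used (exact)
def pvAdjStep (arcs : List (Int × Int)) (d : PySem.Dict Int (PySem.Set Int)) (ij : Int × Int) : PySem.Dict Int (PySem.Set Int) :=
  if pair_relation (pvArcAt arcs ij.1) (pvArcAt arcs ij.2) ≠ "parallel" then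
    (d.modify ij.1 PySem.Set.empty (fun s => PySem.Set.add s ij.2)).modify ij.2 PySem.Set.empty (fun s => PySem.Set.add s ij.1)
  else d

-- adj = {i: set() for i in range(n)}
def pvD0 (n : Int) : PySem.Dict Int (PySem.Set Int) :=
  (PySem.List.pyRange 0 n).foldl (fun d i => d.insert i PySem.Set.empty) PySem.Dict.empty

def pvBuildAdj (arcs : List (Int × Int)) : PySem.Dict Int (PySem.Set Int) :=
  (PySem.List.pyRange 0 (arcs.length : Int)).foldl (fun d i =>
    (PySem.List.pyRange (i + 1) (arcs.length : Int)).foldl (fun d j => pvAdjStep arcs d (i, j)) d)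
    (pvD0 (arcs.length : Int))

-- the body of the while loop: 'for v in adj[u]: if v not in seen: seen.add(v); stack.append(v)'
def pvBFSVisit (seen : PySem.Set Int) (stack : List Int) (ns : PySem.Set Int) : PySem.Set Int × List Int :=
  ns.foldl (fun p v => if PySem.Set.contains p.1 v then p else (PySem.Set.add p.1 v, p.2 ++ [v])) (seen, stack)

-- 'while stack: u = stack.pop(); …'.  The fuel only makes the loop total; it is always sufficient
-- (each iteration pops one element and every push is a newly seen vertex, so ≤ n+1 iterations happen).
-- 'for v in adj[u]' iterates a Python set; the final seen SET (hence the returned Bool) does not depend on that order.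
def pvBFS (adj : PySem.Dict Int (PySem.Set Int)) : Nat → PySem.Set Int → List Int → PySem.Set Int
  | 0, seen, _ => seen
  | fuel + 1, seen, stack =>
      match PySem.List.pop? stack with
      | none => seen
      | some (u, rest) =>
          let p := pvBFSVisit seen rest (adj.getD u PySem.Set.empty)
          pvBFS adj fuel p.1 p.2

def pairing_overlap_graph_connected (pairs : List (Int × Int)) : Bool :=
  let arcs := normalize_pairs pairs
  let n : Int := (arcs.length : Int)
  if n == 0 then true
  else
    let adj := pvBuildAdj arcs
    let seen := pvBFS adj (arcs.length + 1) (PySem.Set.ofList [0]) [0]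
    PySem.Set.len seen == n

-- ===== PORT B =====
def pvSweep : Int → List (Int × Int) → Bool
  | _, [] => true
  | maxr, lr :: rest =>
      if maxr < lr.1 then false
      else pvSweep (if maxr < lr.2 then lr.2 else maxr) rest

def pairing_overlap_graph_connected_alt (pairs : List (Int × Int)) : Bool :=
  match PySem.List.sorted2 (pairs.map (fun p => (min p.1 p.2, max p.1 p.2))) (fun p => p.1) (fun p => p.2) with
  | [] => true
  | lr0 :: rest => pvSweep lr0.2 rest

-- ===== PRECONDITION & SPEC =====
def Spec_pairing_overlap_graph_connected (pairs : List (Int × Int)) (out : Bool) : Prop := out = pairing_overlap_graph_connected_alt pairs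
instance (pairs : List (Int × Int)) (out : Bool) : Decidable (Spec_pairing_overlap_graph_connected pairs out) := by unfold Spec_pairing_overlap_graph_connected; infer_instance

-- ===== CLAIM (what is proved, stated in full; the proofs are below) =====
def Claim_equal_pairing_overlap_graph_connected : Prop := ∀ (pairs : List (Int × Int)), Dom_pairing_overlap_graph_connected pairs → Spec_pairing_overlap_graph_connected pairs (pairing_overlap_graph_connected pairs)

-- ===== LEMMAS AND PROOFS =====

-- lexicographic ≤ on normalized arcs: the order normalize_pairs sorts by
def pvLexLe (a b : Int × Int) : Prop := a.1 < b.1 ∨ (a.1 = b.1 ∧ a.2 ≤ b.2)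

-- arcs i and j overlap (pair_relation is not 'parallel')
def pvEdgeP (a b : Int × Int) : Prop := ¬(a.2 < b.1 ∨ b.2 < a.1)

lemma pvLexLe_trans {a b c : Int × Int} (h1 : pvLexLe a b) (h2 : pvLexLe b c) : pvLexLe a c := by
  unfold pvLexLe at *; omega

lemma pvInsertBy_pairwise (x : Int × Int) (acc : List (Int × Int))
    (h : acc.Pairwise pvLexLe) :
    (PySem.List.insertBy (fun a b => decide (a.1 < b.1) || (!decide (b.1 < a.1) && decide (a.2 < b.2))) x acc).Pairwise pvLexLe := by
  induction acc with
  | nil => simp [PySem.List.insertBy]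
  | cons y ys ih =>
      rw [List.pairwise_cons] at h
      obtain ⟨hy, hys⟩ := h
      rw [PySem.List.insertBy]
      split
      · rename_i hb
        simp only [Bool.or_eq_true, Bool.and_eq_true, decide_eq_true_eq, Bool.not_eq_eq_eq_not,
          Bool.not_true, decide_eq_false_iff_not] at hb
        have hxy : pvLexLe x y := by unfold pvLexLe; omega
        refine List.pairwise_cons.2 ⟨?_, List.pairwise_cons.2 ⟨hy, hys⟩⟩
        intro z hz
        rcases List.mem_cons.1 hz with rfl | hz'
        · exact hxy
        · exact pvLexLe_trans hxy (hy z hz')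
      · rename_i hb
        simp only [Bool.or_eq_true, Bool.and_eq_true, decide_eq_true_eq, Bool.not_eq_eq_eq_not,
          Bool.not_true, decide_eq_false_iff_not, not_or, not_and] at hb
        have hyx : pvLexLe y x := by unfold pvLexLe; omega
        refine List.pairwise_cons.2 ⟨?_, ih hys⟩
        intro z hz
        rcases (PySem.List.mem_insertBy _ _ _ _).1 hz with rfl | hz'
        · exact hyx
        · exact hy z hz'

lemma pvSorted2_pairwise (xs : List (Int × Int)) :
    (PySem.List.sorted2 xs (fun p => p.1) (fun p => p.2) false).Pairwise pvLexLe := by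
  have main : ∀ (l acc : List (Int × Int)), acc.Pairwise pvLexLe →
      (l.foldl (fun acc x => PySem.List.insertBy
        (fun a b => decide (a.1 < b.1) || (!decide (b.1 < a.1) && decide (a.2 < b.2))) x acc) acc).Pairwise pvLexLe := by
    intro l
    induction l with
    | nil => intro acc h; exact h
    | cons a t ih => intro acc h; exact ih _ (pvInsertBy_pairwise a acc h)
  exact main xs [] List.Pairwise.nil

lemma pvNormalize_pairwise (pairs : List (Int × Int)) :
    (normalize_pairs pairs).Pairwise pvLexLe := pvSorted2_pairwise _

lemma pvNormalize_fst_le_snd (pairs : List (Int × Int)) :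
    ∀ p ∈ normalize_pairs pairs, p.1 ≤ p.2 := by
  intro p hp
  unfold normalize_pairs at hp
  have hperm := PySem.List.sorted2_perm (pairs.map (fun p => (min p.1 p.2, max p.1 p.2)))
    (fun p => p.1) (fun p => p.2) false
  have hmem : p ∈ pairs.map (fun p => (min p.1 p.2, max p.1 p.2)) := hperm.mem_iff.1 hp
  obtain ⟨q, _, rfl⟩ := List.mem_map.1 hmem
  exact min_le_max

lemma pvMono (l : List (Int × Int)) (hpw : l.Pairwise pvLexLe) (i j : Nat) (hi : i < l.length)
    (hj : j < l.length) (hij : i ≤ j) : (l[i]'hi).1 ≤ (l[j]'hj).1 := by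
  rcases eq_or_lt_of_le hij with rfl | hlt
  · exact le_refl _
  · have := List.pairwise_iff_getElem.1 hpw i j hi hj hlt
    unfold pvLexLe at this; omega

lemma pvRel_ne_parallel (a b : Int × Int) : (pair_relation a b ≠ "parallel") ↔ pvEdgeP a b := by
  unfold pair_relation pvEdgeP
  split_ifs with h1 h2
  · simp [h1]
  · exact ⟨fun _ => h1, fun _ => by decide⟩
  · exact ⟨fun _ => h1, fun _ => by decide⟩

lemma pvEdgeP_symm {a b : Int × Int} (h : pvEdgeP a b) : pvEdgeP b a := by
  unfold pvEdgeP at *; omega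

def pvPL (n : Int) : List (Int × Int) :=
  (PySem.List.pyRange 0 n).flatMap (fun i => (PySem.List.pyRange (i + 1) n).map (fun j => (i, j)))

lemma pvFoldl_flatMap {α β γ : Type} (l : List α) (g : α → List β) (f : γ → β → γ) (init : γ) :
    (l.flatMap g).foldl f init = l.foldl (fun acc x => (g x).foldl f acc) init := by
  induction l generalizing init with
  | nil => rfl
  | cons a t ih => simp [List.flatMap_cons, List.foldl_append, ih]

lemma pvBuildAdj_eq (arcs : List (Int × Int)) :
    pvBuildAdj arcs = (pvPL (arcs.length : Int)).foldl (pvAdjStep arcs) (pvD0 (arcs.length : Int)) := by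
  rw [pvPL, pvFoldl_flatMap]
  simp [pvBuildAdj, List.foldl_map]

lemma pvFoldInsert_getD (l : List Int) (d : PySem.Dict Int (PySem.Set Int))
    (h : ∀ w, d.getD w PySem.Set.empty = PySem.Set.empty) (u : Int) :
    (l.foldl (fun d i => d.insert i PySem.Set.empty) d).getD u PySem.Set.empty = PySem.Set.empty := by
  induction l generalizing d with
  | nil => exact h u
  | cons a t ih =>
      refine ih _ (fun w => ?_)
      rw [PySem.Dict.getD_insert]
      split
      · rfl
      · exact h w

lemma pvD0_getD (n u : Int) : (pvD0 n).getD u PySem.Set.empty = PySem.Set.empty := by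
  exact pvFoldInsert_getD _ _ (fun w => PySem.Dict.getD_empty w _) u

lemma pvAdjStep_mem (arcs : List (Int × Int)) (d : PySem.Dict Int (PySem.Set Int)) (q : Int × Int) (u v : Int) :
    v ∈ (pvAdjStep arcs d q).getD u PySem.Set.empty ↔
      v ∈ d.getD u PySem.Set.empty ∨
        (pvEdgeP (pvArcAt arcs q.1) (pvArcAt arcs q.2) ∧ ((u, v) = q ∨ (u, v) = (q.2, q.1))) := by
  unfold pvAdjStep
  split
  · rename_i he
    rw [pvRel_ne_parallel] at he
    simp only [PySem.Dict.getD_modify, Prod.ext_iff]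
    split_ifs with h1 h2 h3 <;> simp_all
  · rename_i he
    have hne : ¬ pvEdgeP (pvArcAt arcs q.1) (pvArcAt arcs q.2) :=
      fun hE => he ((pvRel_ne_parallel _ _).2 hE)
    simp [hne]

lemma pvFoldStep_mem (arcs : List (Int × Int)) :
    ∀ (ps : List (Int × Int)) (d : PySem.Dict Int (PySem.Set Int)) (u v : Int),
    v ∈ (ps.foldl (pvAdjStep arcs) d).getD u PySem.Set.empty ↔
      v ∈ d.getD u PySem.Set.empty ∨
        ∃ p ∈ ps, pvEdgeP (pvArcAt arcs p.1) (pvArcAt arcs p.2) ∧ ((u, v) = p ∨ (u, v) = (p.2, p.1)) := by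
  intro ps
  induction ps with
  | nil => intro d u v; simp
  | cons a t ih =>
      intro d u v
      rw [List.foldl_cons, ih, pvAdjStep_mem]
      simp only [List.mem_cons]
      constructor
      · rintro ((h | h) | ⟨p, hp, h⟩)
        · exact Or.inl h
        · exact Or.inr ⟨a, Or.inl rfl, h⟩
        · exact Or.inr ⟨p, Or.inr hp, h⟩
      · rintro (h | ⟨p, (rfl | hp), h⟩)
        · exact Or.inl (Or.inl h)
        · exact Or.inl (Or.inr h)
        · exact Or.inr ⟨p, hp, h⟩

lemma pvMem_PL (n i j : Int) : ((i, j) ∈ pvPL n) ↔ 0 ≤ i ∧ i < j ∧ j < n := by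
  simp only [pvPL, List.mem_flatMap, List.mem_map, PySem.List.mem_pyRange_one]
  constructor
  · rintro ⟨a, ⟨ha0, han⟩, b, ⟨hb1, hbn⟩, heq⟩
    injection heq with h1 h2
    subst h1; subst h2
    omega
  · rintro ⟨h0, hij, hn⟩
    exact ⟨i, ⟨h0, by omega⟩, j, ⟨by omega, hn⟩, rfl⟩

lemma pvMem_adj (arcs : List (Int × Int)) (u v : Int) :
    v ∈ (pvBuildAdj arcs).getD u PySem.Set.empty ↔
      (0 ≤ u ∧ u < (arcs.length : Int) ∧ 0 ≤ v ∧ v < (arcs.length : Int) ∧ u ≠ v ∧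
        pvEdgeP (pvArcAt arcs u) (pvArcAt arcs v)) := by
  rw [pvBuildAdj_eq, pvFoldStep_mem, pvD0_getD]
  constructor
  · rintro (h | ⟨⟨i, j⟩, hp, hE, (heq | heq)⟩)
    · cases h
    · have hb := (pvMem_PL _ i j).1 hp
      injection heq with h1 h2
      subst h1; subst h2
      exact ⟨by omega, by omega, by omega, by omega, by omega, hE⟩
    · have hb := (pvMem_PL _ i j).1 hp
      injection heq with h1 h2
      subst h1; subst h2
      exact ⟨by omega, by omega, by omega, by omega, by omega, pvEdgeP_symm hE⟩
  · rintro ⟨h0u, hun, h0v, hvn, hne, hE⟩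
    rcases lt_or_gt_of_ne hne with hlt | hgt
    · exact Or.inr ⟨(u, v), (pvMem_PL _ u v).2 ⟨h0u, hlt, hvn⟩, hE, Or.inl rfl⟩
    · exact Or.inr ⟨(v, u), (pvMem_PL _ v u).2 ⟨h0v, hgt, hun⟩, pvEdgeP_symm hE, Or.inr rfl⟩

lemma pvArcAt_eq (arcs : List (Int × Int)) (i : Nat) (h : i < arcs.length) :
    pvArcAt arcs (i : Int) = arcs[i] := by
  rw [pvArcAt, PySem.List.pyGetD_eq_getElem _ _ (by omega) (by exact_mod_cast h)]
  simp

lemma pvVisit_spec (ns : List Int) :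
    ∀ (seen : PySem.Set Int) (stack : List Int),
      (∀ x, x ∈ (pvBFSVisit seen stack ns).1 ↔ x ∈ seen ∨ x ∈ ns) ∧
      (seen.Nodup → (pvBFSVisit seen stack ns).1.Nodup) ∧
      (∀ x ∈ (pvBFSVisit seen stack ns).2, x ∈ stack ∨ x ∈ ns) ∧
      (stack <+: (pvBFSVisit seen stack ns).2) ∧
      (∀ x ∈ ns, x ∈ seen ∨ x ∈ (pvBFSVisit seen stack ns).2) ∧
      ((pvBFSVisit seen stack ns).1.length + stack.length
        = seen.length + (pvBFSVisit seen stack ns).2.length) := by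
  induction ns with
  | nil =>
      intro seen stack
      refine ⟨by simp [pvBFSVisit], by simp [pvBFSVisit], by simp [pvBFSVisit],
        by simp [pvBFSVisit], by simp, by simp [pvBFSVisit]⟩
  | cons v t ih =>
      intro seen stack
      by_cases hc : PySem.Set.contains seen v = true
      · have hv : v ∈ seen := by
          simpa [PySem.Set.contains, List.contains_iff_mem] using hc
        have hstep : pvBFSVisit seen stack (v :: t) = pvBFSVisit seen stack t := by
          simp [pvBFSVisit, hv]
        rw [hstep]
        obtain ⟨h1, h2, h3, h4, h5, h6⟩ := ih seen stack
        refine ⟨?_, h2, ?_, h4, ?_, h6⟩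
        · intro x
          rw [h1 x]
          constructor
          · rintro (h | h)
            · exact Or.inl h
            · exact Or.inr (List.mem_cons.2 (Or.inr h))
          · rintro (h | h)
            · exact Or.inl h
            · rcases List.mem_cons.1 h with rfl | h'
              · exact Or.inl hv
              · exact Or.inr h'
        · intro x hx
          rcases h3 x hx with h | h
          · exact Or.inl h
          · exact Or.inr (List.mem_cons.2 (Or.inr h))
        · intro x hx
          rcases List.mem_cons.1 hx with rfl | h'
          · exact Or.inl hv
          · rcases h5 x h' with h | h
            · exact Or.inl h
            · exact Or.inr h
      · have hv : v ∉ seen := by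
          simpa [PySem.Set.contains, List.contains_iff_mem] using hc
        have hstep : pvBFSVisit seen stack (v :: t)
            = pvBFSVisit (seen ++ [v]) (stack ++ [v]) t := by
          simp [pvBFSVisit, PySem.Set.add, hv]
        rw [hstep]
        obtain ⟨h1, h2, h3, h4, h5, h6⟩ := ih (seen ++ [v]) (stack ++ [v])
        refine ⟨?_, ?_, ?_, ?_, ?_, ?_⟩
        · intro x
          rw [h1 x]
          simp only [List.mem_append, List.mem_cons]
          tauto
        · intro hnd
          exact h2 (by
            have : (seen : List Int) ++ [v] = seen.concat v := List.concat_eq_append.symm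
            rw [this, List.nodup_concat]
            exact ⟨hv, hnd⟩)
        · intro x hx
          rcases h3 x hx with h | h
          · rcases List.mem_append.1 h with h' | h'
            · exact Or.inl h'
            · simp only [List.mem_singleton] at h'
              exact Or.inr (List.mem_cons.2 (Or.inl h'))
          · exact Or.inr (List.mem_cons.2 (Or.inr h))
        · exact (List.prefix_append stack [v]).trans h4
        · intro x hx
          rcases List.mem_cons.1 hx with rfl | h'
          · exact Or.inr (h4.subset (by simp))
          · rcases h5 x h' with h | h
            · rcases List.mem_append.1 h with h'' | h''
              · exact Or.inl h''
              · simp only [List.mem_singleton] at h''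
                subst h''
                exact Or.inr (h4.subset (by simp))
            · exact Or.inr h
        · simp only [List.length_append, List.length_singleton] at h6 ⊢
          omega

lemma pvEraseIdx_concat (ys : List Int) (u : Int) : (ys ++ [u]).eraseIdx ys.length = ys := by
  induction ys with
  | nil => rfl
  | cons a t ih => simpa using ih

lemma pvPop_concat (ys : List Int) (u : Int) : PySem.List.pop? (ys ++ [u]) = some (u, ys) := by
  have hlen : (ys ++ [u]).length = ys.length + 1 := by simp
  simp only [PySem.List.pop?, PySem.List.pyIdx?, hlen]
  norm_num
  exact pvEraseIdx_concat ys u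

lemma pvPop_eq_some {stack : List Int} {u : Int} {rest : List Int}
    (h : PySem.List.pop? stack = some (u, rest)) : stack = rest ++ [u] := by
  rcases List.eq_nil_or_concat stack with rfl | ⟨ys, a, rfl⟩
  · simp [PySem.List.pop?, PySem.List.pyIdx?] at h
  · rw [List.concat_eq_append, pvPop_concat] at h
    obtain ⟨h1, h2⟩ := Prod.mk.inj (Option.some.inj h)
    rw [List.concat_eq_append, h1, h2]

lemma pvPop_eq_none {stack : List Int} (h : PySem.List.pop? stack = none) : stack = [] := by
  rcases List.eq_nil_or_concat stack with rfl | ⟨ys, a, rfl⟩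
  · rfl
  · rw [List.concat_eq_append, pvPop_concat] at h; cases h

lemma pvLen_le (l : List Int) (N : Nat) (hn : l.Nodup) (hr : ∀ x ∈ l, 0 ≤ x ∧ x < (N : Int)) :
    l.length ≤ N := by
  have hsub : l ⊆ (List.range N).map (fun k : Nat => (k : Int)) := by
    intro x hx
    rcases hr x hx with ⟨h0, hN⟩
    refine List.mem_map.2 ⟨x.toNat, ?_, ?_⟩
    · exact List.mem_range.2 (by omega)
    · omega
  have := (hn.subperm hsub).length_le
  simpa using this

lemma pvBFS_subset (adj : PySem.Dict Int (PySem.Set Int)) (Good : Int → Prop)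
    (hc : ∀ u v, Good u → v ∈ adj.getD u PySem.Set.empty → Good v) :
    ∀ (fuel : Nat) (seen : PySem.Set Int) (stack : List Int),
      (∀ x ∈ seen, Good x) → (∀ x ∈ stack, Good x) →
      ∀ x ∈ pvBFS adj fuel seen stack, Good x := by
  intro fuel
  induction fuel with
  | zero => intro seen stack hs _ x hx; exact hs x hx
  | succ fuel ih =>
      intro seen stack hs hst x hx
      cases hp : PySem.List.pop? stack with
      | none =>
          simp only [pvBFS, hp] at hx
          exact hs x hx
      | some ur =>
          obtain ⟨u, rest⟩ := ur
          simp only [pvBFS, hp] at hx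
          have hstack := pvPop_eq_some hp
          have hu : Good u := hst u (by rw [hstack]; simp)
          have hrest : ∀ y ∈ rest, Good y := fun y hy => hst y (by rw [hstack]; simp [hy])
          obtain ⟨hmem, _, hstm, _, _, _⟩ :=
            pvVisit_spec (adj.getD u PySem.Set.empty) seen rest
          refine ih _ _ ?_ ?_ x hx
          · intro y hy
            rcases (hmem y).1 hy with h | h
            · exact hs y h
            · exact hc u y hu h
          · intro y hy
            rcases hstm y hy with h | h
            · exact hrest y h
            · exact hc u y hu h

lemma pvBFS_spec (adj : PySem.Dict Int (PySem.Set Int)) (N : Nat)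
    (Hrange : ∀ u v : Int, v ∈ adj.getD u PySem.Set.empty → 0 ≤ v ∧ v < (N : Int)) :
    ∀ (fuel : Nat) (seen : PySem.Set Int) (stack : List Int),
      seen.Nodup → (∀ x ∈ seen, 0 ≤ x ∧ x < (N : Int)) → (∀ x ∈ stack, x ∈ seen) →
      (∀ u, u ∈ seen → u ∉ stack → ∀ v, v ∈ adj.getD u PySem.Set.empty → v ∈ seen) →
      stack.length + (N - seen.length) < fuel →
      (∀ x ∈ seen, x ∈ pvBFS adj fuel seen stack) ∧ (pvBFS adj fuel seen stack).Nodup ∧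
      (∀ u, u ∈ pvBFS adj fuel seen stack → ∀ v, v ∈ adj.getD u PySem.Set.empty →
        v ∈ pvBFS adj fuel seen stack) := by
  intro fuel
  induction fuel with
  | zero => intro seen stack _ _ _ _ hfuel; omega
  | succ fuel ih =>
      intro seen stack hnd hrg hsub hproc hfuel
      cases hp : PySem.List.pop? stack with
      | none =>
          have hstack : stack = [] := pvPop_eq_none hp
          subst hstack
          simp only [pvBFS, hp]
          exact ⟨fun x hx => hx, hnd, fun u hu v hv => hproc u hu (by simp) v hv⟩
      | some ur =>
          obtain ⟨u, rest⟩ := ur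
          have hstack : stack = rest ++ [u] := pvPop_eq_some hp
          have hu : u ∈ seen := hsub u (by rw [hstack]; simp)
          obtain ⟨hmem, hnd', hstm, hpre, hns, hlen⟩ :=
            pvVisit_spec (adj.getD u PySem.Set.empty) seen rest
          set p := pvBFSVisit seen rest (adj.getD u PySem.Set.empty) with hpdef
          have hnd1 : p.1.Nodup := hnd' hnd
          have hrg' : ∀ x ∈ p.1, 0 ≤ x ∧ x < (N : Int) := by
            intro x hx
            rcases (hmem x).1 hx with h | h
            · exact hrg x h
            · exact Hrange u x h
          have hsub' : ∀ x ∈ p.2, x ∈ p.1 := by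
            intro x hx
            rcases hstm x hx with h | h
            · exact (hmem x).2 (Or.inl (hsub x (by rw [hstack]; simp [h])))
            · exact (hmem x).2 (Or.inr h)
          have hproc' : ∀ w, w ∈ p.1 → w ∉ p.2 → ∀ v, v ∈ adj.getD w PySem.Set.empty → v ∈ p.1 := by
            intro w hw hwns v hv
            have hws : w ∈ seen := by
              rcases (hmem w).1 hw with h | h
              · exact h
              · rcases hns w h with h2 | h2
                · exact h2
                · exact absurd h2 hwns
            by_cases hwu : w = u
            · subst hwu
              exact (hmem v).2 (Or.inr hv)
            · have hwstack : w ∉ stack := by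
                rw [hstack]
                intro hmem2
                rcases List.mem_append.1 hmem2 with h | h
                · exact hwns (hpre.subset h)
                · simp only [List.mem_singleton] at h
                  exact hwu h
              exact (hmem v).2 (Or.inl (hproc w hws hwstack v hv))
          have hp1N : p.1.length ≤ N := pvLen_le _ _ hnd1 hrg'
          have hfuel' : p.2.length + (N - p.1.length) < fuel := by
            have hpre1 : rest.length ≤ p.2.length := hpre.length_le
            rw [hstack] at hfuel
            simp only [List.length_append, List.length_singleton] at hfuel
            omega
          obtain ⟨ha, hb, hcc⟩ := ih p.1 p.2 hnd1 hrg' hsub' hproc' hfuel'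
          have heq : pvBFS adj (fuel + 1) seen stack = pvBFS adj fuel p.1 p.2 := by
            simp only [pvBFS, hp]
            rw [hpdef]
          rw [heq]
          exact ⟨fun x hx => ha x ((hmem x).2 (Or.inl hx)), hb, hcc⟩

lemma pvIfMax (m r : Int) : (if m < r then r else m) = max m r := by
  rcases lt_or_ge m r with h | h <;> simp [max_def] <;> omega

lemma pvLe_foldl_max_iff (c m : Int) (l : List Int) :
    c ≤ l.foldl max m ↔ c ≤ m ∨ ∃ y ∈ l, c ≤ y := by
  constructor
  · intro h
    rcases PySem.List.foldl_max_mem l m with he | he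
    · exact Or.inl (he ▸ h)
    · exact Or.inr ⟨_, he, h⟩
  · rintro (h | ⟨y, hy, h⟩)
    · exact le_trans h (PySem.List.le_foldl_max l m).1
    · exact le_trans h ((PySem.List.le_foldl_max l m).2 y hy)

lemma pvSweep_true_iff : ∀ (xs : List (Int × Int)) (m : Int),
    pvSweep m xs = true ↔
      ∀ (k : Nat) (hk : k < xs.length), (xs[k]'hk).1 ≤ ((xs.take k).map Prod.snd).foldl max m := by
  intro xs
  induction xs with
  | nil => intro m; simp [pvSweep]
  | cons a t ih =>
      intro m
      rw [pvSweep, pvIfMax]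
      by_cases h : m < a.1
      · rw [if_pos h]
        constructor
        · intro hF; cases hF
        · intro hall
          have := hall 0 (by simp)
          simp only [List.getElem_cons_zero, List.take_zero, List.map_nil, List.foldl_nil] at this
          omega
      · rw [if_neg h, ih]
        constructor
        · intro hall k hk
          cases k with
          | zero =>
              simp only [List.getElem_cons_zero, List.take_zero, List.map_nil, List.foldl_nil]
              omega
          | succ k =>
              have := hall k (by simpa using Nat.lt_of_succ_lt_succ hk)
              simpa [List.take_succ_cons] using this
        · intro hall k hk
          have := hall (k + 1) (by simpa using Nat.succ_lt_succ hk)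
          simpa [List.take_succ_cons] using this

-- sweep over the tail succeeds iff every later arc starts no later than some earlier arc ends
lemma pvSweep_char (a0 : Int × Int) (rest : List (Int × Int)) :
    pvSweep a0.2 rest = true ↔
      ∀ (k : Nat) (hk : k < (a0 :: rest).length), 0 < k →
        ∃ i : Nat, ∃ hik : i < k, (((a0 :: rest)[k]'hk).1 ≤ (((a0 :: rest)[i]'(by omega)).2)) := by
  rw [pvSweep_true_iff]
  constructor
  · intro hall k hk hk0
    obtain ⟨j, rfl⟩ : ∃ j, k = j + 1 := ⟨k - 1, by omega⟩
    have hj : j < rest.length := by simpa using hk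
    have h := hall j hj
    rw [pvLe_foldl_max_iff] at h
    rcases h with h | ⟨y, hy, hle⟩
    · exact ⟨0, by omega, by simpa using h⟩
    · obtain ⟨q, hq, rfl⟩ := List.mem_map.1 hy
      obtain ⟨i, hi, hqi⟩ := List.getElem_of_mem hq
      have hij : i < j := by
        have := hi
        simp only [List.length_take] at this
        omega
      have hiq : rest[i]'(by omega) = q := by
        rw [← hqi]
        exact (List.getElem_take ..).symm
      refine ⟨i + 1, by omega, ?_⟩
      simp only [List.getElem_cons_succ]
      rw [hiq]
      exact hle
  · intro hall j hj
    obtain ⟨i, hik, hle⟩ := hall (j + 1) (by simpa using Nat.succ_lt_succ hj) (by omega)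
    rw [pvLe_foldl_max_iff]
    cases i with
    | zero =>
        left
        simpa using hle
    | succ i =>
        right
        have hi' : i < rest.length := by omega
        refine ⟨(rest[i]'(by omega)).2, ?_, ?_⟩
        · refine List.mem_map.2 ⟨rest[i]'(by omega), ?_, rfl⟩
          have : (rest.take j)[i]'(by simp; omega) = rest[i]'(by omega) := List.getElem_take ..
          rw [← this]
          exact List.getElem_mem _
        · simpa using hle

-- ===== VERDICT (by name: the statement is the Claim_ definition above) =====
theorem pairing_overlap_graph_connected_spec : Claim_equal_pairing_overlap_graph_connected := by
  intro pairs _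
  unfold Spec_pairing_overlap_graph_connected
  have halt : pairing_overlap_graph_connected_alt pairs
      = (match normalize_pairs pairs with
         | [] => true
         | lr0 :: rest => pvSweep lr0.2 rest) := rfl
  cases harc : normalize_pairs pairs with
  | nil =>
      rw [halt, harc]
      simp [pairing_overlap_graph_connected, harc]
  | cons a0 rest =>
      rw [halt, harc]
      show pairing_overlap_graph_connected pairs = pvSweep a0.2 rest
      set arcs := a0 :: rest with harcsdef
      have hpw : arcs.Pairwise pvLexLe := by rw [← harc]; exact pvNormalize_pairwise pairs
      have hfs : ∀ p ∈ arcs, p.1 ≤ p.2 := by rw [← harc]; exact pvNormalize_fst_le_snd pairs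
      have hN1 : 0 < arcs.length := by rw [harcsdef]; simp
      have hA : pairing_overlap_graph_connected pairs
          = (PySem.Set.len (pvBFS (pvBuildAdj arcs) (arcs.length + 1) (PySem.Set.ofList [0]) [0])
              == (arcs.length : Int)) := by
        show (if (((normalize_pairs pairs).length : Int) == 0) = true then true
              else PySem.Set.len (pvBFS (pvBuildAdj (normalize_pairs pairs))
                ((normalize_pairs pairs).length + 1) (PySem.Set.ofList [0]) [0])
                == ((normalize_pairs pairs).length : Int)) = _
        rw [harc]
        rw [if_neg (by simp)]
      set adj := pvBuildAdj arcs with hadjdef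
      have Hadj : ∀ u v : Int, v ∈ adj.getD u PySem.Set.empty ↔
          (0 ≤ u ∧ u < (arcs.length : Int) ∧ 0 ≤ v ∧ v < (arcs.length : Int) ∧ u ≠ v ∧
            pvEdgeP (pvArcAt arcs u) (pvArcAt arcs v)) := by
        intro u v
        rw [hadjdef]
        exact pvMem_adj arcs u v
      have harcat : ∀ (w : Int) (h0 : 0 ≤ w) (hw : w < (arcs.length : Int)),
          pvArcAt arcs w = arcs[w.toNat]'(by omega) := by
        intro w h0 hw
        have h := pvArcAt_eq arcs w.toNat (by omega)
        rw [show ((w.toNat : Nat) : Int) = w from by omega] at h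
        exact h
      have hedge : ∀ (i k : Nat) (hik : i < k) (hk : k < arcs.length),
          (arcs[k]'hk).1 ≤ (arcs[i]'(by omega)).2 →
          ((k : Int)) ∈ adj.getD ((i : Int)) PySem.Set.empty := by
        intro i k hik hk hle
        refine (Hadj _ _).2 ⟨by omega, by omega, by omega, by omega, by omega, ?_⟩
        rw [pvArcAt_eq arcs i (by omega), pvArcAt_eq arcs k (by omega)]
        have h1 : (arcs[i]'(by omega)).1 ≤ (arcs[k]'hk).1 :=
          pvMono arcs hpw i k (by omega) hk (by omega)
        have h2 : (arcs[k]'hk).1 ≤ (arcs[k]'hk).2 := hfs _ (List.getElem_mem _)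
        unfold pvEdgeP
        omega
      have Hrange : ∀ u v : Int, v ∈ adj.getD u PySem.Set.empty → 0 ≤ v ∧ v < (arcs.length : Int) := by
        intro u v hv
        have h := (Hadj u v).1 hv
        exact ⟨h.2.2.1, h.2.2.2.1⟩
      have hseen0 : ∀ x ∈ ([(0 : Int)] : PySem.Set Int), 0 ≤ x ∧ x < (arcs.length : Int) := by
        intro x hx
        simp only [List.mem_singleton] at hx
        subst hx
        constructor
        · exact le_refl 0
        · exact_mod_cast hN1
      obtain ⟨hkeep, hndS, hclosed⟩ := pvBFS_spec adj arcs.length Hrange (arcs.length + 1)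
        [0] [0] (List.nodup_singleton 0) hseen0 (fun x hx => hx)
        (by
          intro u hu hnst v hv
          exact absurd hu hnst)
        (by simp; omega)
      set s := pvBFS adj (arcs.length + 1) [0] [0] with hsdef
      have hofl : (PySem.Set.ofList [(0 : Int)] : PySem.Set Int) = [(0 : Int)] := rfl
      rw [hA, hofl]
      have h0 : (0 : Int) ∈ s := hkeep 0 (by simp)
      by_cases hcon : ∀ (k : Nat) (hk : k < arcs.length), 0 < k →
          ∃ i : Nat, ∃ hik : i < k, ((arcs[k]'hk).1 ≤ ((arcs[i]'(by omega)).2))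
      · -- no gap: both sides are true
        have hB : pvSweep a0.2 rest = true := (pvSweep_char a0 rest).2 hcon
        rw [hB]
        have hall : ∀ k : Nat, k < arcs.length → ((k : Int)) ∈ s := by
          intro k
          induction k using Nat.strong_induction_on with
          | _ k IH =>
              intro hkN
              rcases Nat.eq_zero_or_pos k with rfl | hk0
              · exact_mod_cast h0
              · obtain ⟨i, hik, hle⟩ := hcon k hkN hk0
                exact hclosed _ (IH i hik (by omega)) _ (hedge i k hik hkN hle)
        have hrangeS : ∀ x ∈ s, 0 ≤ x ∧ x < (arcs.length : Int) := by
          refine pvBFS_subset adj _ (fun u v _ hv => Hrange u v hv) (arcs.length + 1)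
            [0] [0] hseen0 hseen0 
        have hge : arcs.length ≤ s.length := by
          have hsub2 : (List.range arcs.length).map (fun k : Nat => (k : Int)) ⊆ s := by
            intro x hx
            obtain ⟨k, hk, rfl⟩ := List.mem_map.1 hx
            exact hall k (List.mem_range.1 hk)
          have hndr : ((List.range arcs.length).map (fun k : Nat => (k : Int))).Nodup :=
            List.Nodup.map (fun a b h => by exact_mod_cast h) (List.nodup_range)
          have := (hndr.subperm hsub2).length_le
          simpa using this
        have hle2 : s.length ≤ arcs.length := pvLen_le s arcs.length hndS hrangeS
        have hlen : s.length = arcs.length := le_antisymm hle2 hge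
        have hfin : PySem.Set.len s = (arcs.length : Int) := by
          rw [PySem.Set.len, hlen]
        rw [hfin]
        simp
      · -- gap: both sides are false
        have hB : pvSweep a0.2 rest = false := by
          cases hBc : pvSweep a0.2 rest with
          | false => rfl
          | true => exact absurd ((pvSweep_char a0 rest).1 hBc) hcon
        rw [hB]
        push_neg at hcon
        obtain ⟨k, hk, hk0, hgap⟩ := hcon
        have hgapall : ∀ (i : Nat) (hik : i < k), (arcs[i]'(by omega)).2 < (arcs[k]'hk).1 := by
          intro i hik
          have := hgap i hik
          omega
        have hGood : ∀ u v : Int, (0 ≤ u ∧ u < (k : Int)) →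
            v ∈ adj.getD u PySem.Set.empty → 0 ≤ v ∧ v < (k : Int) := by
          intro u v hGu hv
          obtain ⟨h0u, huN, h0v, hvN, hne, hE⟩ := (Hadj u v).1 hv
          refine ⟨h0v, ?_⟩
          by_contra hge
          push_neg at hge
          have hLv : (arcs[k]'hk).1 ≤ (pvArcAt arcs v).1 := by
            rw [harcat v h0v hvN]
            exact pvMono arcs hpw k v.toNat hk (by omega) (by omega)
          have hRu : (pvArcAt arcs u).2 < (arcs[k]'hk).1 := by
            rw [harcat u h0u huN]
            exact hgapall u.toNat (by omega)
          unfold pvEdgeP at hE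
          omega
        have hGood0 : ∀ x ∈ ([(0 : Int)] : PySem.Set Int), 0 ≤ x ∧ x < (k : Int) := by
          intro x hx
          simp only [List.mem_singleton] at hx
          subst hx
          constructor
          · exact le_refl 0
          · exact_mod_cast hk0
        have hsubGood : ∀ x ∈ s, 0 ≤ x ∧ x < (k : Int) :=
          pvBFS_subset adj _ hGood (arcs.length + 1) [0] [0] hGood0 hGood0
        have hlek : s.length ≤ k := pvLen_le s k hndS hsubGood
        simp only [PySem.Set.len, beq_eq_false_iff_ne, ne_eq]
        intro hcontr
        have : s.length = arcs.length := by exact_mod_cast hcontr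
        omega
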